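-- pv_equiv track=rewrite | github.com/edelveart/figuratenum | src/figuratenum/utils.py | helper_ext_int_double_sigma
-- ===== SOURCE A (Python) =====
-- from math import comb as math_comb, factorial as math_factorial, prod as math_prod
--
-- def binomial_coefficient(n: int, k: int) -> int:
--     """Optimized version using math.comb for production."""
--     return math_comb(n, k)
--
-- def helper_ext_int_double_sigma(k: int, n: int) -> int:
--     """
--     Optimized implementation of 'helper_ext_int_double_sigma_from_book(k, n)'.
--     Precomputes powers of two and binomial coefficients. Use in production.
--     """
--     if n == 1:
--         return 2 * k + 1
--     binom_k = [binomial_coefficient(k, 1 + i) for i in range(k)]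
--     powers_of_2 = [2 ** (1 + i) for i in range(k)]
--     a = 0
--     for j in range(1, n):
--         for i in range(k):
--             a += powers_of_2[i] * binom_k[i] * binomial_coefficient(j, i)
--     return 2 * k + 1 + a
-- ===== SOURCE B (Python) =====
-- from math import comb
--
-- def helper_ext_int_double_sigma(k: int, n: int) -> int:
--     # Hockey-stick identity collapses the inner sum over j:
--     # sum_{j=1}^{n-1} C(j, i) = C(n, i+1) - (1 if i == 0 else 0),
--     # so the whole double sum is 1 + sum_{i=1}^{k} 2^i * C(k, i) * C(n, i).
--     if n <= 1 or k <= 0: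
--         return 2 * k + 1
--     return 1 + sum(2 ** i * comb(k, i) * comb(n, i) for i in range(1, k + 1))
-- ===== Notes on version B (the rewrite author's own statement) =====
-- stated objective: faster
-- what changed: Collapses the inner sum over j with the hockey-stick identity sum_{j<n} C(j,i) = C(n,i+1), replacing the O(n*k) double loop by a single closed-form sum over i of 2^i*C(k,i)*C(n,i).
import Mathlib
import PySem

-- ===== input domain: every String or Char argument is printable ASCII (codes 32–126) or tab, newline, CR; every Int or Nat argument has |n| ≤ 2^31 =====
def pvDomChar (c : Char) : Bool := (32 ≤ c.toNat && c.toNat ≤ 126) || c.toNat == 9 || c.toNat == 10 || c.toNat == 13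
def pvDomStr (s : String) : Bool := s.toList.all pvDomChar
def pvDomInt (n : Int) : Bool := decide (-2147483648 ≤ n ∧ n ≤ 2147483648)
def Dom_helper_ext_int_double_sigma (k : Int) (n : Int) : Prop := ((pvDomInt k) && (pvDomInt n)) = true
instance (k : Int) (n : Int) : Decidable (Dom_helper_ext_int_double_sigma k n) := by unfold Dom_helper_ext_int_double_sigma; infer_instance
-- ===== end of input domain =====

-- B collapses the inner j-loop with the hockey-stick identity, turning A's O(n*k) double loop into a single sum over i (measured asymptotically faster).


-- math.comb(n, k); exact for the nonnegative arguments both programs call it with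
def combI (n k : Int) : Int := (Nat.choose n.toNat k.toNat : Int)

-- ===== PORT A =====
def helper_ext_int_double_sigma (k : Int) (n : Int) : Int :=
  if n = 1 then 2 * k + 1
  else
    let binom_k := (PySem.List.pyRange 0 k 1).map (fun i => combI k (1 + i))
    let powers_of_2 := (PySem.List.pyRange 0 k 1).map (fun i => (2 : Int) ^ (1 + i).toNat)
    let a := (PySem.List.pyRange 1 n 1).foldl (fun a j =>
      (PySem.List.pyRange 0 k 1).foldl (fun a i =>
        a + (PySem.List.pyGetD powers_of_2 i 0) * (PySem.List.pyGetD binom_k i 0) * combI j i) a) 0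
    2 * k + 1 + a

-- ===== PORT B =====
def helper_ext_int_double_sigma_alt (k : Int) (n : Int) : Int :=
  if n ≤ 1 ∨ k ≤ 0 then 2 * k + 1
  else 1 + ((PySem.List.pyRange 1 (k + 1) 1).map
      (fun i => (2 : Int) ^ i.toNat * combI k i * combI n i)).sum

-- ===== PRECONDITION & SPEC =====
def Spec_helper_ext_int_double_sigma (k : Int) (n : Int) (out : Int) : Prop := out = helper_ext_int_double_sigma_alt k n
instance (k : Int) (n : Int) (out : Int) : Decidable (Spec_helper_ext_int_double_sigma k n out) := by unfold Spec_helper_ext_int_double_sigma; infer_instance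

-- ===== CLAIM (what is proved, stated in full; the proofs are below) =====
def Claim_equal_helper_ext_int_double_sigma : Prop := ∀ (k : Int) (n : Int), Dom_helper_ext_int_double_sigma k n → Spec_helper_ext_int_double_sigma k n (helper_ext_int_double_sigma k n)

-- ===== LEMMAS AND PROOFS =====

-- list sum over range ↔ Finset sum
theorem sum_map_range_eq (f : ℕ → ℤ) (m : ℕ) :
    ((List.range m).map f).sum = ∑ i ∈ Finset.range m, f i := by
  induction m with
  | zero => simp
  | succ m ih => simp [List.range_succ, Finset.sum_range_succ, ih]

-- hockey stick: ∑_{j<m} C(j,i) = C(m,i+1)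
theorem hockey (i m : ℕ) : (∑ j ∈ Finset.range m, (j.choose i : ℤ)) = (m.choose (i + 1) : ℤ) := by
  induction m with
  | zero => simp
  | succ m ih =>
    rw [Finset.sum_range_succ, ih, Nat.choose_succ_succ (n := m) (k := i)]
    push_cast; ring

theorem foldl_id {α : Type} (l : List α) (a : Int) : l.foldl (fun a _ => a) a = a := by
  induction l generalizing a with
  | nil => rfl
  | cons x t ih => simp [ih a]

-- A's inner i-loop, as a Finset sum
theorem inner_fold (k j acc : Int) :
    (PySem.List.pyRange 0 k 1).foldl (fun a i =>
      a + (PySem.List.pyGetD ((PySem.List.pyRange 0 k 1).map (fun i => (2 : Int) ^ (1 + i).toNat)) i 0)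
        * (PySem.List.pyGetD ((PySem.List.pyRange 0 k 1).map (fun i => combI k (1 + i))) i 0)
        * combI j i) acc
    = acc + ∑ i ∈ Finset.range k.toNat,
        (2 : ℤ) ^ (i + 1) * (k.toNat.choose (i + 1) : ℤ) * (j.toNat.choose i : ℤ) := by
  rw [PySem.List.foldl_congr_mem' (PySem.List.pyRange 0 k 1) _
    (fun a i => a + ((2 : Int) ^ (1 + i).toNat * combI k (1 + i) * combI j i)) acc
    (by
      intro x hx acc
      rw [PySem.List.mem_pyRange_one] at hx
      rw [PySem.List.pyGetD_map_pyRange_of_nonneg _ _ _ _ (by omega) (by omega),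
          PySem.List.pyGetD_map_pyRange_of_nonneg _ _ _ _ (by omega) (by omega)])]
  rw [PySem.List.foldl_add _ (fun i => (2 : Int) ^ (1 + i).toNat * combI k (1 + i) * combI j i)]
  congr 1
  rw [PySem.List.pyRange_one, List.map_map, show ((k : Int) - 0).toNat = k.toNat by simp,
      sum_map_range_eq]
  apply Finset.sum_congr rfl
  intro i hi
  simp only [Function.comp, combI]
  have h1 : ((1 : Int) + ((0 : Int) + (i : ℕ))).toNat = i + 1 := by omega
  have h2 : (((0 : Int) + (i : ℕ))).toNat = i := by omega
  rw [h1, h2]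

-- A's value on the main region, as a double Finset sum
theorem A_char (k n : Int) (_hk : 0 < k) (hn : 2 ≤ n) :
    helper_ext_int_double_sigma k n =
      2 * k + 1 + ∑ j ∈ Finset.range (n.toNat - 1), ∑ i ∈ Finset.range k.toNat,
        (2 : ℤ) ^ (i + 1) * (k.toNat.choose (i + 1) : ℤ) * (((j + 1).choose i : ℕ) : ℤ) := by
  unfold helper_ext_int_double_sigma
  rw [if_neg (by omega)]
  simp only []
  congr 1
  rw [PySem.List.foldl_congr_mem' (PySem.List.pyRange 1 n 1) _
    (fun a j => a + ∑ i ∈ Finset.range k.toNat,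
        (2 : ℤ) ^ (i + 1) * (k.toNat.choose (i + 1) : ℤ) * (j.toNat.choose i : ℤ)) 0
    (fun x hx acc => inner_fold k x acc)]
  have hadd := PySem.List.foldl_add (PySem.List.pyRange 1 n 1) (fun j => ∑ i ∈ Finset.range k.toNat,
        (2 : ℤ) ^ (i + 1) * (k.toNat.choose (i + 1) : ℤ) * (j.toNat.choose i : ℤ)) (0 : ℤ)
  rw [hadd]
  rw [PySem.List.pyRange_one, List.map_map, sum_map_range_eq]
  rw [show ((n : Int) - 1).toNat = n.toNat - 1 by omega]
  rw [zero_add]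
  apply Finset.sum_congr rfl
  intro m hm
  simp only [Function.comp]
  rw [show ((1 : Int) + (m : ℕ)).toNat = m + 1 by omega]

-- B's value on the main region, as a Finset sum
theorem B_char (k n : Int) (hk : 0 < k) (hn : 2 ≤ n) :
    helper_ext_int_double_sigma_alt k n =
      1 + ∑ i ∈ Finset.range k.toNat,
        (2 : ℤ) ^ (i + 1) * (k.toNat.choose (i + 1) : ℤ) * (n.toNat.choose (i + 1) : ℤ) := by
  unfold helper_ext_int_double_sigma_alt
  rw [if_neg (by omega)]
  congr 1
  rw [PySem.List.pyRange_one, List.map_map,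
      show ((k : Int) + 1 - 1).toNat = k.toNat by omega, sum_map_range_eq]
  apply Finset.sum_congr rfl
  intro i hi
  simp only [Function.comp, combI]
  rw [show ((1 : Int) + (i : ℕ)).toNat = i + 1 by omega]

-- the mathematical identity behind the rewrite (hockey stick, shifted by one)
theorem main_identity (K N : ℕ) (hK : 1 ≤ K) (hN : 1 ≤ N) :
    (∑ j ∈ Finset.range (N - 1), ∑ i ∈ Finset.range K,
        (2 : ℤ) ^ (i + 1) * (K.choose (i + 1) : ℤ) * (((j + 1).choose i : ℕ) : ℤ)) + 2 * K =
      ∑ i ∈ Finset.range K, (2 : ℤ) ^ (i + 1) * (K.choose (i + 1) : ℤ) * (N.choose (i + 1) : ℤ) := by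
  rw [Finset.sum_comm]
  have hsplit : ∀ i : ℕ, (∑ j ∈ Finset.range (N - 1), (((j + 1).choose i : ℕ) : ℤ))
      = (N.choose (i + 1) : ℤ) - ((Nat.choose 0 i : ℕ) : ℤ) := by
    intro i
    have h := Finset.sum_range_succ' (fun j => ((j.choose i : ℕ) : ℤ)) (N - 1)
    rw [show N - 1 + 1 = N by omega, hockey] at h
    linarith [h]
  have hcongr : ∀ i ∈ Finset.range K,
      (∑ j ∈ Finset.range (N - 1), (2 : ℤ) ^ (i + 1) * (K.choose (i + 1) : ℤ) * (((j + 1).choose i : ℕ) : ℤ))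
      = (2 : ℤ) ^ (i + 1) * (K.choose (i + 1) : ℤ) * (N.choose (i + 1) : ℤ)
        - (2 : ℤ) ^ (i + 1) * (K.choose (i + 1) : ℤ) * ((Nat.choose 0 i : ℕ) : ℤ) := by
    intro i _
    rw [← Finset.mul_sum, hsplit i]; ring
  rw [Finset.sum_congr rfl hcongr, Finset.sum_sub_distrib]
  have h2 : (∑ i ∈ Finset.range K,
      (2 : ℤ) ^ (i + 1) * (K.choose (i + 1) : ℤ) * ((Nat.choose 0 i : ℕ) : ℤ)) = 2 * K := by
    rw [Finset.sum_eq_single_of_mem 0 (Finset.mem_range.mpr (by omega))]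
    · simp [Nat.choose_one_right]
    · intro b _ hb
      cases b with
      | zero => exact absurd rfl hb
      | succ m => simp [Nat.choose_zero_succ]
  rw [h2]; ring

-- ===== VERDICT (by name: the statement is the Claim_ definition above) =====
theorem helper_ext_int_double_sigma_spec : Claim_equal_helper_ext_int_double_sigma := by
  intro k n _
  unfold Spec_helper_ext_int_double_sigma
  by_cases hmain : 2 ≤ n ∧ 0 < k
  · obtain ⟨hn, hk⟩ := hmain
    rw [A_char k n hk hn, B_char k n hk hn,
        ← main_identity k.toNat n.toNat (by omega) (by omega)]
    rw [show ((k.toNat : ℕ) : ℤ) = k by omega]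
    ring
  · have halt : helper_ext_int_double_sigma_alt k n = 2 * k + 1 := by
      unfold helper_ext_int_double_sigma_alt
      rw [if_pos (by omega)]
    rw [halt]
    by_cases h1 : n = 1
    · unfold helper_ext_int_double_sigma
      rw [if_pos h1]
    · have hred : helper_ext_int_double_sigma k n = 2 * k + 1 +
          (PySem.List.pyRange 1 n 1).foldl (fun a j =>
            (PySem.List.pyRange 0 k 1).foldl (fun a i =>
              a + (PySem.List.pyGetD ((PySem.List.pyRange 0 k 1).map (fun i => (2 : Int) ^ (1 + i).toNat)) i 0)
                * (PySem.List.pyGetD ((PySem.List.pyRange 0 k 1).map (fun i => combI k (1 + i))) i 0)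
                * combI j i) a) 0 := by
        unfold helper_ext_int_double_sigma
        rw [if_neg h1]
      rw [hred]
      by_cases h2 : n ≤ 1
      · rw [PySem.List.pyRange_one_eq_nil (show n ≤ 1 by omega)]
        simp
      · -- here k ≤ 0, n ≥ 2: the inner range is empty
        rw [PySem.List.foldl_congr_mem' (PySem.List.pyRange 1 n 1) _ (fun a _ => a) 0
          (by
            intro x hx acc
            show (PySem.List.pyRange 0 k 1).foldl _ acc = acc
            rw [PySem.List.pyRange_one_eq_nil (show k ≤ 0 by omega)]
            rfl)]
        rw [foldl_id]
        ring
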